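-- pv_equiv track=rewrite | github.com/tafreeman/prompts | scripts/fix_frontmatter.py | infer_audiences
-- ===== SOURCE A (Python) =====
-- from typing import Dict, Any, Optional, Tuple
--
-- def infer_audiences(fm: Dict, category: str = None) -> list:
--     """Infer target audiences based on content and category."""
--     # Check for existing tags that hint at audience
--     tags = fm.get("tags", [])
--     if isinstance(tags, str):
--         tags = [tags]
--
--     tags_str = " ".join(str(t).lower() for t in tags)
--
--     audiences = []
--
--     # Map category/tags to audiences
--     if category:
--         category_lower = category.lower()
--         if "developer" in category_lower or "developers" in category_lower:
--             audiences = ["senior-engineer", "junior-engineer"]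
--         elif "business" in category_lower:
--             audiences = ["business-analyst", "project-manager"]
--         elif "analysis" in category_lower:
--             audiences = ["business-analyst", "senior-engineer"]
--         elif "governance" in category_lower:
--             audiences = ["senior-engineer", "solution-architect"]
--         elif "system" in category_lower:
--             audiences = ["solution-architect", "senior-engineer"]
--         elif "m365" in category_lower:
--             audiences = ["functional-team", "business-analyst"]
--         elif "creative" in category_lower:
--             audiences = ["functional-team", "business-analyst"]
--         elif "agents" in category_lower:
--             audiences = ["senior-engineer", "solution-architect"]
--         elif "concepts" in category_lower:
--             audiences = ["junior-engineer", "senior-engineer"]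
--         elif "docs" in category_lower:
--             audiences = ["junior-engineer", "senior-engineer"]
--         elif "frameworks" in category_lower:
--             audiences = ["senior-engineer", "solution-architect"]
--         elif "techniques" in category_lower:
--             audiences = ["senior-engineer", "junior-engineer"]
--         elif "guides" in category_lower:
--             audiences = ["junior-engineer", "senior-engineer"]
--         elif "get-started" in category_lower:
--             audiences = ["junior-engineer", "senior-engineer"]
--
--     # Refine based on tags
--     if "project-manager" in tags_str:
--         if "project-manager" not in audiences:
--             audiences.insert(0, "project-manager")
--     if "architect" in tags_str or "enterprise" in tags_str:
--         if "solution-architect" not in audiences: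
--             audiences.insert(0, "solution-architect")
--     if "qa" in tags_str or "testing" in tags_str:
--         if "qa-engineer" not in audiences:
--             audiences.insert(0, "qa-engineer")
--
--     if not audiences:
--         audiences = ["senior-engineer", "junior-engineer"]
--
--     return audiences[:3]  # Max 3 audiences
-- ===== SOURCE B (Python) =====
-- # Score-and-sort re-implementation: every candidate audience gets a numeric rank
-- # (tag-derived candidates 0-2, category candidates 3-4), the category is found by
-- # taking the minimum index among ALL matching table entries, and the answer is the
-- # rank-sorted candidate set (default when empty), truncated to 3.
--
-- _CATEGORY_TABLE = [
--     ("developer", ["senior-engineer", "junior-engineer"]),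
--     ("business", ["business-analyst", "project-manager"]),
--     ("analysis", ["business-analyst", "senior-engineer"]),
--     ("governance", ["senior-engineer", "solution-architect"]),
--     ("system", ["solution-architect", "senior-engineer"]),
--     ("m365", ["functional-team", "business-analyst"]),
--     ("creative", ["functional-team", "business-analyst"]),
--     ("agents", ["senior-engineer", "solution-architect"]),
--     ("concepts", ["junior-engineer", "senior-engineer"]),
--     ("docs", ["junior-engineer", "senior-engineer"]),
--     ("frameworks", ["senior-engineer", "solution-architect"]),
--     ("techniques", ["senior-engineer", "junior-engineer"]),
--     ("guides", ["junior-engineer", "senior-engineer"]),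
--     ("get-started", ["junior-engineer", "senior-engineer"]),
-- ]
--
-- _TAG_RULES = [
--     (0, "qa-engineer", ("qa", "testing")),
--     (1, "solution-architect", ("architect", "enterprise")),
--     (2, "project-manager", ("project-manager",)),
-- ]
--
--
-- def infer_audiences(fm, category=None):
--     """Infer target audiences based on content and category."""
--     tags = fm.get("tags", [])
--     if isinstance(tags, str):
--         tags = [tags]
--     tags_str = " ".join(str(t).lower() for t in tags)
--
--     base = []
--     if category:
--         cl = category.lower()
--         hits = [i for i, (kw, _) in enumerate(_CATEGORY_TABLE) if kw in cl]
--         if hits: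
--             base = _CATEGORY_TABLE[min(hits)][1]
--
--     rank = {}
--     for j, aud in enumerate(base):
--         rank[aud] = 3 + j
--     for prio, aud, keys in _TAG_RULES:
--         if aud not in rank and any(k in tags_str for k in keys):
--             rank[aud] = prio
--
--     if not rank:
--         return ["senior-engineer", "junior-engineer"]
--     return sorted(rank, key=rank.get)[:3]
-- ===== Notes on version B (the rewrite author's own statement) =====
-- stated objective: alternative
-- what changed: B replaces A's first-match if/elif cascade and sequential guarded insert(0,...) steps by a score-and-sort algorithm: it selects the category row as the table entry of minimum matching index among all matches, assigns every candidate audience a numeric rank in a dict (tag-rule candidates 0-2, category candidates 3-4), and returns the keys sorted by rank, truncated to 3.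
import Mathlib
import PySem

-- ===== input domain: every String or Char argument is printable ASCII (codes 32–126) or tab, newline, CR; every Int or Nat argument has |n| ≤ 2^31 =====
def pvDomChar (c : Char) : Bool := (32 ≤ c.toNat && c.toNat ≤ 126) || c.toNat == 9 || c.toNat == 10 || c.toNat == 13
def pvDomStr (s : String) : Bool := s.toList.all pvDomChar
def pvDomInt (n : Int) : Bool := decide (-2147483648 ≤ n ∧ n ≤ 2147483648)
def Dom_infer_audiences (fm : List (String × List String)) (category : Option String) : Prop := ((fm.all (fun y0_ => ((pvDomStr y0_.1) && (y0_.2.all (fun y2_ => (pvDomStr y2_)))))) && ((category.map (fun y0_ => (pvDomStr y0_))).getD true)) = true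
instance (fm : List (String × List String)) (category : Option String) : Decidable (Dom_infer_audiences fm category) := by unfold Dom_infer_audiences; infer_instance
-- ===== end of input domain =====

-- B replaces A's if/elif cascade and sequential insert(0,..) refinements by a score-and-sort
-- algorithm: the category row is the table entry of minimum matching index, every candidate
-- audience gets a numeric rank in a dict, and the answer is the rank-sorted key list
-- (objective: alternative, same cost).

-- ===== PORT A =====
-- A's category → audiences if/elif cascade, branch for branch
def pvCatA (category : Option String) : List String :=
  match category with
  | none => []                    -- 'if category:' is false for None
  | some c =>
    if c = "" then []             -- ... and for the empty string
    else
      let cl := PySem.Str.lower c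
      if PySem.Str.isIn "developer" cl || PySem.Str.isIn "developers" cl then ["senior-engineer", "junior-engineer"]
      else if PySem.Str.isIn "business" cl then ["business-analyst", "project-manager"]
      else if PySem.Str.isIn "analysis" cl then ["business-analyst", "senior-engineer"]
      else if PySem.Str.isIn "governance" cl then ["senior-engineer", "solution-architect"]
      else if PySem.Str.isIn "system" cl then ["solution-architect", "senior-engineer"]
      else if PySem.Str.isIn "m365" cl then ["functional-team", "business-analyst"]
      else if PySem.Str.isIn "creative" cl then ["functional-team", "business-analyst"]
      else if PySem.Str.isIn "agents" cl then ["senior-engineer", "solution-architect"]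
      else if PySem.Str.isIn "concepts" cl then ["junior-engineer", "senior-engineer"]
      else if PySem.Str.isIn "docs" cl then ["junior-engineer", "senior-engineer"]
      else if PySem.Str.isIn "frameworks" cl then ["senior-engineer", "solution-architect"]
      else if PySem.Str.isIn "techniques" cl then ["senior-engineer", "junior-engineer"]
      else if PySem.Str.isIn "guides" cl then ["junior-engineer", "senior-engineer"]
      else if PySem.Str.isIn "get-started" cl then ["junior-engineer", "senior-engineer"]
      else []

-- A's three sequential insert(0, ...)-with-guard refinements, the empty fallback and [:3];
-- p/s/q are the three tag conditions exactly as A computes them on tags_str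
def pvFinA (p s q : Bool) (audiences : List String) : List String :=
  let a1 := if p then (if audiences.contains "project-manager" then audiences else "project-manager" :: audiences) else audiences
  let a2 := if s then (if a1.contains "solution-architect" then a1 else "solution-architect" :: a1) else a1
  let a3 := if q then (if a2.contains "qa-engineer" then a2 else "qa-engineer" :: a2) else a2
  let a4 := if a3 = [] then ["senior-engineer", "junior-engineer"] else a3
  a4.take 3                       -- audiences[:3] (exact: nonnegative stop)

def infer_audiences (fm : List (String × List String)) (category : Option String) : List String :=
  -- tags = fm.get("tags", []); under this typing tags is always a list, so the
  -- isinstance(tags, str) branch never fires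
  let tags := (PySem.Dict.mk fm).getD "tags" []
  let tags_str := PySem.Str.join " " (tags.map (fun t => PySem.Str.lower t))
  pvFinA (PySem.Str.isIn "project-manager" tags_str)
         (PySem.Str.isIn "architect" tags_str || PySem.Str.isIn "enterprise" tags_str)
         (PySem.Str.isIn "qa" tags_str || PySem.Str.isIn "testing" tags_str)
         (pvCatA category)

-- ===== PORT B =====
def pvCategoryTable : List (String × List String) :=
  [("developer", ["senior-engineer", "junior-engineer"]),
   ("business", ["business-analyst", "project-manager"]),
   ("analysis", ["business-analyst", "senior-engineer"]),
   ("governance", ["senior-engineer", "solution-architect"]),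
   ("system", ["solution-architect", "senior-engineer"]),
   ("m365", ["functional-team", "business-analyst"]),
   ("creative", ["functional-team", "business-analyst"]),
   ("agents", ["senior-engineer", "solution-architect"]),
   ("concepts", ["junior-engineer", "senior-engineer"]),
   ("docs", ["junior-engineer", "senior-engineer"]),
   ("frameworks", ["senior-engineer", "solution-architect"]),
   ("techniques", ["senior-engineer", "junior-engineer"]),
   ("guides", ["junior-engineer", "senior-engineer"]),
   ("get-started", ["junior-engineer", "senior-engineer"])]

def pvTagRules : List (Int × String × List String) :=
  [(0, "qa-engineer", ["qa", "testing"]),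
   (1, "solution-architect", ["architect", "enterprise"]),
   (2, "project-manager", ["project-manager"])]

-- Source B's category step: hits = [i for i,(kw,_) in enumerate(TABLE) if kw in cl];
-- if hits: base = TABLE[min(hits)][1]
def pvCatB (category : Option String) : List String :=
  match category with
  | none => []
  | some c =>
    if c = "" then []
    else
      let cl := PySem.Str.lower c
      let hits := ((PySem.List.enumerate pvCategoryTable).filter
          (fun p => PySem.Str.isIn p.2.1 cl)).map Prod.fst
      match PySem.List.min? hits (fun x => x) with
      | none => []
      | some i => ((PySem.List.pyGet? pvCategoryTable i).map Prod.snd).getD []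
            -- the index comes from enumerate, so it is always in range (getD never used)

-- Source B's rank dict (base items ranked 3,4; guarded tag-rule inserts ranked 0..2)
-- and the rank-sorted key list with the empty fallback and [:3]
def pvRankSort (ts : String) (base : List String) : List String :=
  let rank := (PySem.List.enumerate base).foldl
      (fun d p => d.insert p.2 (3 + p.1)) (PySem.Dict.empty : PySem.Dict String Int)
  let rank := pvTagRules.foldl
      (fun d r => if !(d.contains r.2.1) && r.2.2.any (fun k => PySem.Str.isIn k ts)
                  then d.insert r.2.1 r.1 else d) rank
  if rank.items = [] then ["senior-engineer", "junior-engineer"]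
  else (PySem.List.sorted rank.keys (fun a => rank.getD a 0) false).take 3

def infer_audiences_alt (fm : List (String × List String)) (category : Option String) : List String :=
  let tags := (PySem.Dict.mk fm).getD "tags" []
  let tags_str := PySem.Str.join " " (tags.map (fun t => PySem.Str.lower t))
  pvRankSort tags_str (pvCatB category)

-- ===== PRECONDITION & SPEC =====
def Spec_infer_audiences (fm : List (String × List String)) (category : Option String) (out : List String) : Prop := out = infer_audiences_alt fm category
instance (fm : List (String × List String)) (category : Option String) (out : List String) : Decidable (Spec_infer_audiences fm category out) := by unfold Spec_infer_audiences; infer_instance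

-- ===== CLAIM (what is proved, stated in full; the proofs are below) =====
def Claim_equal_infer_audiences : Prop := ∀ (fm : List (String × List String)) (category : Option String), Dom_infer_audiences fm category → Spec_infer_audiences fm category (infer_audiences fm category)

-- ===== LEMMAS AND PROOFS =====

-- the first-matching-entry reading of A's cascade, used only inside the proofs as
-- a stepping stone between the cascade and B's min-index selection
def pvScanTable : List (String × List String) → String → List String
  | [], _ => []
  | (kw, aud) :: rest, cl => if PySem.Str.isIn kw cl then aud else pvScanTable rest cl

-- "developers" occurring in cl forces "developer" to occur, so A's first disjunct alone decides the branch
lemma pv_dev_imp (cl : String) (h : PySem.Str.isIn "developers" cl = true) :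
    PySem.Str.isIn "developer" cl = true := by
  rw [PySem.Str.isIn_iff_infix] at h ⊢
  exact List.IsInfix.trans ⟨[], ['s'], rfl⟩ h

-- the cascade equals the first-match scan of the table
lemma pv_cat_scan (category : Option String) :
    pvCatA category = (match category with
      | none => []
      | some c => if c = "" then [] else pvScanTable pvCategoryTable (PySem.Str.lower c)) := by
  cases category with
  | none => rfl
  | some c =>
    unfold pvCatA
    by_cases hc : c = ""
    · simp [hc]
    · simp only [if_neg hc]
      simp only [pvScanTable, pvCategoryTable]
      cases h1 : PySem.Str.isIn "developer" (PySem.Str.lower c) with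
      | true => simp
      | false =>
        cases h2 : PySem.Str.isIn "developers" (PySem.Str.lower c) with
        | true => exact absurd (pv_dev_imp _ h2) (by simpa using h1)
        | false => simp

-- every index produced by enumerate from offset s is ≥ s
lemma pv_enum_fst_ge (tbl : List (String × List String)) (s : Int) (p : Int × (String × List String))
    (hp : p ∈ PySem.List.enumerate tbl s) : s ≤ p.1 := by
  rw [PySem.List.mem_enumerate_iff] at hp
  obtain ⟨k, hk, rfl⟩ := hp
  simp

-- min of a nonempty Int list whose head is a lower bound is the head
lemma pv_min_head (x : Int) (t : List Int) (h : ∀ y ∈ t, x ≤ y) :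
    PySem.List.min? (x :: t) (fun y => y) = some x := by
  rw [PySem.List.min?_id_cons]
  congr 1
  induction t generalizing x with
  | nil => rfl
  | cons a t ih =>
    have hxa : x ≤ a := h a (by simp)
    simp only [List.foldl_cons, min_eq_left hxa]
    exact ih x (fun y hy => h y (by simp [hy]))

-- the first-match scan equals B's min-index selection (generalized over a consumed prefix)
lemma pv_scan_minidx_aux (tbl pre : List (String × List String)) (cl : String) :
    pvScanTable tbl cl =
      (match PySem.List.min? (((PySem.List.enumerate tbl (pre.length : Int)).filter
          (fun p => PySem.Str.isIn p.2.1 cl)).map Prod.fst) (fun x => x) with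
       | none => []
       | some i => ((PySem.List.pyGet? (pre ++ tbl) i).map Prod.snd).getD []) := by
  induction tbl generalizing pre with
  | nil => simp [pvScanTable, PySem.List.enumerate_nil, PySem.List.min?]
  | cons hd rest ih =>
    obtain ⟨kw, aud⟩ := hd
    rw [PySem.List.enumerate_cons]
    simp only [pvScanTable, List.filter_cons]
    cases h : PySem.Str.isIn kw cl with
    | true =>
      simp only [if_true, List.map_cons]
      rw [pv_min_head _ _ (by
        intro y hy
        simp only [List.mem_map] at hy
        obtain ⟨p, hp, rfl⟩ := hy
        have := pv_enum_fst_ge rest ((pre.length : Int) + 1) p (List.mem_of_mem_filter hp)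
        omega)]
      simp
    | false =>
      simp only [Bool.false_eq_true, if_false]
      have hc : pre ++ (kw, aud) :: rest = (pre ++ [(kw, aud)]) ++ rest := by simp
      have hlen : (pre.length : Int) + 1 = ((pre ++ [(kw, aud)]).length : Int) := by
        simp
      rw [hc, hlen]
      exact ih (pre ++ [(kw, aud)])

-- the two category steps agree
lemma pv_cat_eq (category : Option String) : pvCatA category = pvCatB category := by
  rw [pv_cat_scan]
  cases category with
  | none => rfl
  | some c =>
    by_cases hc : c = ""
    · simp [pvCatB, hc]
    · simp only [pvCatB, if_neg hc]
      have h := pv_scan_minidx_aux pvCategoryTable [] (PySem.Str.lower c)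
      simp only [List.length_nil, Nat.cast_zero, List.nil_append] at h
      exact h

-- the scan yields [] or one of the table's audience lists
lemma pv_scan_mem (tbl : List (String × List String)) (cl : String) :
    pvScanTable tbl cl = [] ∨ pvScanTable tbl cl ∈ tbl.map Prod.snd := by
  induction tbl with
  | nil => exact Or.inl rfl
  | cons hd tl ih =>
    obtain ⟨kw, aud⟩ := hd
    simp only [pvScanTable]
    cases h : PySem.Str.isIn kw cl with
    | true => simp
    | false => rcases ih with h' | h' <;> simp [h']

-- B's category step yields [] or one of the table's audience lists
lemma pv_catB_mem (category : Option String) :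
    pvCatB category = [] ∨ pvCatB category ∈ pvCategoryTable.map Prod.snd := by
  rw [← pv_cat_eq, pv_cat_scan]
  cases category with
  | none => exact Or.inl rfl
  | some c =>
    by_cases hc : c = ""
    · simp [hc]
    · simp only [if_neg hc]
      exact pv_scan_mem pvCategoryTable (PySem.Str.lower c)

-- A's finishing steps agree with B's rank-and-sort for every base the category step can produce
lemma pv_finish_eq (ts : String) (base : List String)
    (h : base = [] ∨ base ∈ pvCategoryTable.map Prod.snd) :
    pvFinA (PySem.Str.isIn "project-manager" ts)
           (PySem.Str.isIn "architect" ts || PySem.Str.isIn "enterprise" ts)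
           (PySem.Str.isIn "qa" ts || PySem.Str.isIn "testing" ts) base
      = pvRankSort ts base := by
  simp only [pvCategoryTable, List.map, List.mem_cons, List.not_mem_nil, or_false] at h
  simp only [pvRankSort, pvTagRules, List.foldl_cons, List.foldl_nil,
    List.any_cons, List.any_nil, Bool.or_false]
  rcases h with rfl | rfl | rfl | rfl | rfl | rfl | rfl | rfl | rfl | rfl | rfl | rfl | rfl | rfl | rfl <;>
    (cases hp : PySem.Str.isIn "project-manager" ts <;>
     cases ha : PySem.Str.isIn "architect" ts <;>
     cases he : PySem.Str.isIn "enterprise" ts <;>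
     cases hq : PySem.Str.isIn "qa" ts <;>
     cases ht : PySem.Str.isIn "testing" ts <;>
     decide)

-- ===== VERDICT (by name: the statement is the Claim_ definition above) =====
theorem infer_audiences_spec : Claim_equal_infer_audiences := by
  intro fm category _
  show infer_audiences fm category = infer_audiences_alt fm category
  show pvFinA _ _ _ (pvCatA category) = pvRankSort _ (pvCatB category)
  rw [pv_cat_eq]
  exact pv_finish_eq _ _ (pv_catB_mem category)
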